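-- pv_equiv track=rewrite | github.com/MTG/compIAM | compiam/utils/pitch.py | add_center_to_mask
-- ===== SOURCE A (Python) =====
-- def add_center_to_mask(mask):
--     num_one = 0
--     indices = []
--     for i, s in enumerate(mask):
--         if s == 1:
--             num_one += 1
--             indices.append(i)
--         else:
--             li = len(indices)
--             if li:
--                 middle = indices[int(li / 2)]
--                 mask[middle] = 2
--                 num_one = 0
--                 indices = []
--     return mask
-- ===== SOURCE B (Python) =====
-- def add_center_to_mask(mask):
--     # Two-phase: run-length-encode mask into maximal runs of (value == 1),
--     # then mark the middle of every 1-run except a run that reaches the end.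
--     groups = []  # (key, start, length)
--     for i, v in enumerate(mask):
--         k = v == 1
--         if groups and groups[-1][0] == k:
--             kk, s, n = groups[-1]
--             groups[-1] = (kk, s, n + 1)
--         else:
--             groups.append((k, i, 1))
--     for j, (k, start, n) in enumerate(groups):
--         if k and j != len(groups) - 1:
--             mask[start + n // 2] = 2
--     return mask
-- ===== Notes on version B (the rewrite author's own statement) =====
-- stated objective: alternative
-- what changed: B replaces A's single streaming pass that carries run state (indices list) through the loop by a two-phase run-length grouping: first build the maximal runs of (value == 1) as (key, start, length) triples, then mark start + length//2 of every 1-run except the final group, reproducing A's behaviour of leaving a run that reaches the end unmarked.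
import Mathlib
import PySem

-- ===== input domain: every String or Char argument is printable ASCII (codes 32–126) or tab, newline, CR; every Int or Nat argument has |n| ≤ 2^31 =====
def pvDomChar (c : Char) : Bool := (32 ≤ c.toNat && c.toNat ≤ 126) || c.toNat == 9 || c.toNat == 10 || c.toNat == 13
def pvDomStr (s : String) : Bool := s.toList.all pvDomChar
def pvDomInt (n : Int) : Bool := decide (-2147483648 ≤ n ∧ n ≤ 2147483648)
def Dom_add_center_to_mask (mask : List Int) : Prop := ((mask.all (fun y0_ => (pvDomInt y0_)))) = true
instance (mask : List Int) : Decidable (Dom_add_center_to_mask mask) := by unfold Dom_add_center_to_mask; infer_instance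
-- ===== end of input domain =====

-- B replaces A's single streaming pass (run state carried through the loop) by a two-phase
-- run-length grouping: build the maximal runs of (value == 1), then mark start + len//2 of
-- every 1-run that is not the final group (a run reaching the end is left unmarked, as in A).
-- Objective: alternative decomposition, same O(n) cost. Both A and B mutate `mask` in place
-- identically; the equivalence proved here is about the return value.

-- ===== PORT A =====
-- the body of A's for-loop (state: mask, num_one, indices)
def stepA (st : List Int × Int × List Int) (p : Int × Int) : List Int × Int × List Int :=
  if p.2 == 1 then (st.1, st.2.1 + 1, st.2.2 ++ [p.1])
  else
    let li : Nat := st.2.2.length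
    if li ≠ 0 then
      let middle := PySem.List.pyGetD st.2.2 ((li : Int) / 2) 0
      (PySem.List.pySetD st.1 middle 2, 0, ([] : List Int))
    else st

def add_center_to_mask (mask : List Int) : List Int :=
  ((PySem.List.enumerate mask 0).foldl stepA (mask, 0, ([] : List Int))).1

-- ===== PORT B =====
-- body of B's first loop: extend the last group or append a fresh one
def groupStep (gs : List (Bool × Nat × Nat)) (p : Int × Int) : List (Bool × Nat × Nat) :=
  let k := p.2 == 1
  match gs.getLast? with
  | some (k', s, n) =>
      if k' = k then gs.dropLast ++ [(k', s, n + 1)] else gs ++ [(k, p.1.toNat, 1)]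
  | none => [(k, p.1.toNat, 1)]

-- body of B's second loop: mark the middle of a 1-run unless it is the last group
def markStep (T : Int) (m : List Int) (q : Int × (Bool × Nat × Nat)) : List Int :=
  if q.2.1 = true ∧ q.1 ≠ T - 1 then m.set (q.2.2.1 + q.2.2.2 / 2) 2 else m

def add_center_to_mask_alt (mask : List Int) : List Int :=
  let gs := (PySem.List.enumerate mask 0).foldl groupStep []
  (PySem.List.enumerate gs 0).foldl (markStep (gs.length : Int)) mask

-- ===== PRECONDITION & SPEC =====
def Spec_add_center_to_mask (mask : List Int) (out : List Int) : Prop := out = add_center_to_mask_alt mask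
instance (mask : List Int) (out : List Int) : Decidable (Spec_add_center_to_mask mask out) := by unfold Spec_add_center_to_mask; infer_instance

-- ===== CLAIM (what is proved, stated in full; the proofs are below) =====
def Claim_equal_add_center_to_mask : Prop := ∀ (mask : List Int), Dom_add_center_to_mask mask → Spec_add_center_to_mask mask (add_center_to_mask mask)

-- ===== LEMMAS AND PROOFS =====

-- the positions both programs set to 2, computed structurally: position i, pending 1-run length L
def marksR : List Int → Nat → Nat → List Nat
  | [], _, _ => []
  | x :: xs, i, L =>
    if x == 1 then marksR xs (i + 1) (L + 1)
    else (if L ≠ 0 then [i - L + L / 2] else []) ++ marksR xs (i + 1) 0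

def applyMarks (m : List Int) (ps : List Nat) : List Int := ps.foldl (fun m p => m.set p 2) m

-- the marks B's second loop produces from a group list (last group never marked)
def marksB : List (Bool × Nat × Nat) → List Nat
  | [] => []
  | [_] => []
  | (k, s, n) :: g :: gs => (if k then [s + n / 2] else []) ++ marksB (g :: gs)

-- B's grouping, phrased structurally with an open group
def grow : (Bool × Nat × Nat) → List Int → Nat → List (Bool × Nat × Nat)
  | c, [], _ => [c]
  | (k, s, n), x :: xs, i =>
    if (x == 1) = k then grow (k, s, n + 1) xs (i + 1)
    else (k, s, n) :: grow ((x == 1), i, 1) xs (i + 1)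

lemma grow_ne_nil (c : Bool × Nat × Nat) (xs : List Int) (i : Nat) : grow c xs i ≠ [] := by
  induction xs generalizing c i with
  | nil => simp [grow]
  | cons x xs ih =>
      obtain ⟨k, s, n⟩ := c
      simp only [grow]
      split
      · exact ih _ _
      · simp

-- A's fold computes applyMarks of marksR
lemma foldA (xs : List Int) : ∀ (i L : Nat) (m : List Int) (c : Int), L ≤ i →
    ((PySem.List.enumerate xs (i : Int)).foldl stepA
      (m, c, (List.range L).map (fun j => ((i - L + j : Nat) : Int)))).1
      = applyMarks m (marksR xs i L) := by
  induction xs with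
  | nil => intro i L m c h; simp [PySem.List.enumerate_nil, marksR, applyMarks]
  | cons x xs ih =>
      intro i L m c h
      rw [PySem.List.enumerate_cons]
      by_cases hx : x == 1
      · -- extend the run
        have hstep : stepA (m, c, (List.range L).map (fun j => ((i - L + j : Nat) : Int))) ((i : Int), x)
            = (m, c + 1, (List.range (L + 1)).map (fun j => (((i + 1) - (L + 1) + j : Nat) : Int))) := by
          simp only [stepA, hx, if_pos]
          simp [List.range_succ, Nat.succ_sub_succ]
          omega
        rw [List.foldl_cons, hstep]
        have : ((i : Int) + 1) = (((i + 1 : Nat)) : Int) := by push_cast; ring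
        rw [this, ih (i + 1) (L + 1) m (c + 1) (by omega)]
        simp [marksR, hx]
      · by_cases hL : L = 0
        · subst hL
          have hstep : stepA (m, c, (List.range 0).map (fun j => ((i - 0 + j : Nat) : Int))) ((i : Int), x)
              = (m, c, (List.range 0).map (fun j => ((i - 0 + j : Nat) : Int))) := by
            simp [stepA, hx]
          rw [List.foldl_cons, hstep]
          have h1 : ((i : Int) + 1) = (((i + 1 : Nat)) : Int) := by push_cast; ring
          have h2 : (List.range 0).map (fun j => ((i - 0 + j : Nat) : Int))
              = (List.range 0).map (fun j => (((i + 1) - 0 + j : Nat) : Int)) := by simp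
          rw [h1, h2, ih (i + 1) 0 m c (by omega)]
          simp [marksR, hx]
        · -- close the run: mark i - L + L/2
          have hlen : ((List.range L).map (fun j => ((i - L + j : Nat) : Int))).length = L := by simp
          have hget : PySem.List.pyGetD ((List.range L).map (fun j => ((i - L + j : Nat) : Int))) ((L : Int) / 2) 0
              = ((i - L + L / 2 : Nat) : Int) := by
            have hdiv : ((L : Int) / 2) = ((L / 2 : Nat) : Int) := by
              omega
            rw [hdiv, PySem.List.pyGetD_natCast]
            have : L / 2 < L := Nat.div_lt_self (by omega) (by omega)
            rw [List.getD_eq_getElem _ _ (by simpa using this)]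
            simp
          have hstep : stepA (m, c, (List.range L).map (fun j => ((i - L + j : Nat) : Int))) ((i : Int), x)
              = (m.set (i - L + L / 2) 2, 0, ([] : List Int)) := by
            simp only [stepA]
            rw [if_neg (by simp [hx])]
            rw [if_pos (by simpa [hlen] using hL)]
            simp only [hlen, hget]
            rw [PySem.List.pySetD_natCast]
          rw [List.foldl_cons, hstep]
          have h1 : ((i : Int) + 1) = (((i + 1 : Nat)) : Int) := by push_cast; ring
          have h2 : ([] : List Int) = (List.range 0).map (fun j => (((i + 1) - 0 + j : Nat) : Int)) := by simp
          rw [h1, h2, ih (i + 1) 0 (m.set (i - L + L / 2) 2) 0 (by omega)]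
          simp [marksR, hx, hL, applyMarks]

-- B's first fold equals grow (invariant: finished groups ++ one open group)
lemma foldGrow (xs : List Int) : ∀ (i : Nat) (done : List (Bool × Nat × Nat)) (c : Bool × Nat × Nat),
    (PySem.List.enumerate xs (i : Int)).foldl groupStep (done ++ [c]) = done ++ grow c xs i := by
  induction xs with
  | nil => intro i done c; simp [PySem.List.enumerate_nil, grow]
  | cons x xs ih =>
      intro i done c
      obtain ⟨k, s, n⟩ := c
      rw [PySem.List.enumerate_cons, List.foldl_cons]
      have hlast : (done ++ [(k, s, n)]).getLast? = some (k, s, n) := by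
        simp [List.getLast?_append]
      have hdl : (done ++ [(k, s, n)]).dropLast = done := by
        simp
      have h1 : ((i : Int) + 1) = (((i + 1 : Nat)) : Int) := by push_cast; ring
      by_cases hk : (x == 1) = k
      · have hstep : groupStep (done ++ [(k, s, n)]) ((i : Int), x) = done ++ [(k, s, n + 1)] := by
          simp only [groupStep, hlast, hk, if_pos, hdl]
        rw [hstep, h1, ih (i + 1) done (k, s, n + 1)]
        simp [grow, hk]
      · have hstep : groupStep (done ++ [(k, s, n)]) ((i : Int), x)
            = done ++ ([(k, s, n)] ++ [((x == 1), i, 1)]) := by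
          simp only [groupStep, hlast]
          rw [if_neg (fun h => hk (by rw [h]))]
          simp
        rw [hstep, h1]
        have ih' := ih (i + 1) (done ++ [(k, s, n)]) ((x == 1), i, 1)
        rw [List.append_assoc] at ih'
        rw [ih']
        simp [grow, hk]

-- marksB of a false-headed nonempty tail ignores the head
lemma marksB_false_cons (a b : Nat) (g : Bool × Nat × Nat) (gs : List (Bool × Nat × Nat)) :
    marksB ((false, a, b) :: g :: gs) = marksB (g :: gs) := by
  simp [marksB]

-- grow's groups produce exactly marksR
lemma growMarks (xs : List Int) : ∀ (i s n : Nat) (k : Bool), s + n = i → 1 ≤ n →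
    marksB (grow (k, s, n) xs i) = marksR xs i (if k then n else 0) := by
  induction xs with
  | nil => intro i s n k h1 h2; cases k <;> simp [grow, marksB, marksR]
  | cons x xs ih =>
      intro i s n k h1 h2
      by_cases hx : x == 1
      · cases k with
        | true =>
            have : grow (true, s, n) (x :: xs) i = grow (true, s, n + 1) xs (i + 1) := by
              simp [grow, hx]
            rw [this, ih (i + 1) s (n + 1) true (by omega) (by omega)]
            simp [marksR, hx]
        | false =>
            have : grow (false, s, n) (x :: xs) i
                = (false, s, n) :: grow (true, i, 1) xs (i + 1) := by
              simp [grow, hx]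
            rw [this]
            cases hg : grow (true, i, 1) xs (i + 1) with
            | nil => exact absurd hg (grow_ne_nil _ _ _)
            | cons g gs =>
                rw [marksB_false_cons, ← hg, ih (i + 1) i 1 true (by omega) (by omega)]
                simp [marksR, hx]
      · cases k with
        | true =>
            have : grow (true, s, n) (x :: xs) i
                = (true, s, n) :: grow (false, i, 1) xs (i + 1) := by
              simp [grow, hx]
            rw [this]
            cases hg : grow (false, i, 1) xs (i + 1) with
            | nil => exact absurd hg (grow_ne_nil _ _ _)
            | cons g gs =>
                have hmB : marksB ((true, s, n) :: g :: gs) = [s + n / 2] ++ marksB (g :: gs) := by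
                  simp [marksB]
                rw [hmB, ← hg, ih (i + 1) i 1 false (by omega) (by omega)]
                have hn : n ≠ 0 := by omega
                have hs : i - n + n / 2 = s + n / 2 := by omega
                simp [marksR, hx, hn, hs]
        | false =>
            have : grow (false, s, n) (x :: xs) i = grow (false, s, n + 1) xs (i + 1) := by
              simp [grow, hx]
            rw [this, ih (i + 1) s (n + 1) false (by omega) (by omega)]
            simp [marksR, hx]

-- B's second fold equals applyMarks of marksB
lemma foldMark (T : Int) (gs : List (Bool × Nat × Nat)) : ∀ (s : Int) (m : List Int),
    s + gs.length = T →
    (PySem.List.enumerate gs s).foldl (markStep T) m = applyMarks m (marksB gs) := by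
  induction gs with
  | nil => intro s m h; simp [PySem.List.enumerate_nil, marksB, applyMarks]
  | cons g gs ih =>
      intro s m h
      obtain ⟨k, st, n⟩ := g
      rw [PySem.List.enumerate_cons, List.foldl_cons]
      cases gs with
      | nil =>
          have hs : s = T - 1 := by simp at h; omega
          have : markStep T m (s, (k, st, n)) = m := by
            simp [markStep, hs]
          rw [this]
          simp [PySem.List.enumerate_nil, marksB, applyMarks]
      | cons g' gs' =>
          have hne : s ≠ T - 1 := by simp at h; omega
          cases k with
          | true =>
              have : markStep T m (s, (true, st, n)) = m.set (st + n / 2) 2 := by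
                simp [markStep, hne]
              rw [this, ih (s + 1) _ (by simp at h ⊢; omega)]
              simp [marksB, applyMarks]
          | false =>
              have : markStep T m (s, (false, st, n)) = m := by
                simp [markStep]
              rw [this, ih (s + 1) _ (by simp at h ⊢; omega)]
              simp [marksB, applyMarks]

lemma alt_eq (mask : List Int) : add_center_to_mask_alt mask = applyMarks mask (marksR mask 0 0) := by
  unfold add_center_to_mask_alt
  cases mask with
  | nil =>
      simp [PySem.List.enumerate_nil, applyMarks, marksR]
  | cons x xs =>
      have h0 : (PySem.List.enumerate (x :: xs) 0).foldl groupStep [] = grow ((x == 1), 0, 1) xs 1 := by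
        have : (0 : Int) = ((0 : Nat) : Int) := by norm_num
        rw [this, PySem.List.enumerate_cons, List.foldl_cons]
        have hstep : groupStep [] (((0 : Nat) : Int), x) = [] ++ [((x == 1), 0, 1)] := by
          simp [groupStep]
        rw [hstep]
        have h1 : (((0 : Nat) : Int) + 1) = ((1 : Nat) : Int) := by norm_num
        rw [h1, foldGrow xs 1 [] ((x == 1), 0, 1)]
        simp
      simp only [h0]
      rw [foldMark ((grow ((x == 1), 0, 1) xs 1).length : Int) (grow ((x == 1), 0, 1) xs 1) 0 (x :: xs) (by simp)]
      rw [growMarks xs 1 0 1 (x == 1) (by omega) (by omega)]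
      by_cases hx : x == 1
      · simp [marksR, hx]
      · simp [marksR, hx]

-- ===== VERDICT (by name: the statement is the Claim_ definition above) =====
theorem add_center_to_mask_spec : Claim_equal_add_center_to_mask := by
  intro mask _
  unfold Spec_add_center_to_mask
  rw [alt_eq]
  unfold add_center_to_mask
  have h := foldA mask 0 0 mask 0 (by omega)
  simp only [Nat.cast_zero, List.range_zero, List.map_nil] at h
  rw [h]
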